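-- pv_equiv track=rewrite | github.com/Sadvi108/BankFlow_ML | train_pattern_based.py | _classify_format
-- ===== SOURCE A (Python) =====
-- def _classify_format(ref_id: str):
--     """Classify the format of a reference ID."""
--     # Remove spaces for analysis
--     clean_id = ref_id.replace(' ', '')
--
--     if clean_id.isdigit():
--         return f"numeric_{len(clean_id)}"
--     elif clean_id.isalpha():
--         return f"alpha_{len(clean_id)}"
--     elif clean_id.isalnum():
--         # Count letters and digits
--         letters = sum(c.isalpha() for c in clean_id)
--         digits = sum(c.isdigit() for c in clean_id)
--         return f"alnum_L{letters}_D{digits}"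
--     else:
--         return "mixed_special"
-- ===== SOURCE B (Python) =====
-- def _category(c):
--     """Exclusive class of one character: N digit, A letter, U other alnum, M special."""
--     if c.isdigit():
--         return 'N'
--     if c.isalpha():
--         return 'A'
--     if c.isalnum():
--         return 'U'
--     return 'M'
--
--
-- def _join(s, t):
--     """Join in the classification lattice E < {N, A} < U < M."""
--     if s == 'E':
--         return t
--     if t == s:
--         return s
--     if s == 'M' or t == 'M':
--         return 'M'
--     return 'U'
--
--
-- def _classify_format(ref_id: str):
--     """Classify a reference ID: map each character to its class once, fold the classes with a lattice join."""
--     clean_id = ref_id.replace(' ', '')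
--     cats = [_category(c) for c in clean_id]
--     state = 'E'
--     for k in cats:
--         state = _join(state, k)
--     if state == 'N':
--         return f"numeric_{len(clean_id)}"
--     if state == 'A':
--         return f"alpha_{len(clean_id)}"
--     if state == 'U':
--         return f"alnum_L{cats.count('A')}_D{cats.count('N')}"
--     return "mixed_special"
-- ===== Notes on version B (the rewrite author's own statement) =====
-- stated objective: alternative
-- what changed: Replaced A's cascade of whole-string predicate scans by mapping each character once to an exclusive class tag (digit/letter/other-alnum/special), folding the tag list with a lattice join to get the classification, and reading the letter/digit counts off the tag list with .count.
import Mathlib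
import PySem

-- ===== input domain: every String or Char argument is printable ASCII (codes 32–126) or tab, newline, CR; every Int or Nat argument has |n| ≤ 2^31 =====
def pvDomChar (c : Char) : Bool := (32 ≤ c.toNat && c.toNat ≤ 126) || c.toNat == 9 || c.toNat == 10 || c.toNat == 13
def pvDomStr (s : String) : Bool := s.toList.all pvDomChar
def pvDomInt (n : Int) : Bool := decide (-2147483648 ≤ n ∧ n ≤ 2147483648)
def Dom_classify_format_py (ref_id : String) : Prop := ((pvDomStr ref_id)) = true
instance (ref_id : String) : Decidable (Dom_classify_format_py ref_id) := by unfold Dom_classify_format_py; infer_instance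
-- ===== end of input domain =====

-- B replaces A's cascade of whole-string predicate scans by a fold over a classification lattice (per-char exclusive class, combined by lattice join); alternative decomposition, same O(n) cost.


-- ===== PORT A =====
def classify_format_py (ref_id : String) : String :=
  let clean_id := PySem.Str.replace ref_id " " ""
  if PySem.Str.strIsdigit clean_id then
    "numeric_" ++ PySem.Int.toStr (PySem.Str.len clean_id)
  else if PySem.Str.strIsalpha clean_id then
    "alpha_" ++ PySem.Int.toStr (PySem.Str.len clean_id)
  else if PySem.Str.strIsalnum clean_id then
    let letters := (clean_id.toList.map (fun c => if PySem.Chars.isalpha c then (1 : Int) else 0)).sum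
    let digits := (clean_id.toList.map (fun c => if PySem.Chars.isdigit c then (1 : Int) else 0)).sum
    "alnum_L" ++ PySem.Int.toStr letters ++ "_D" ++ PySem.Int.toStr digits
  else
    "mixed_special"

-- ===== PORT B =====
-- exclusive class of one character: N digit, A letter, U other alnum, M special; E = empty
inductive PvSt | E | N | A | U | M
deriving DecidableEq, Repr

def pvCategory (c : Char) : PvSt :=
  if PySem.Chars.isdigit c then .N
  else if PySem.Chars.isalpha c then .A
  else if PySem.Chars.isalnum c then .U
  else .M

-- join in the classification lattice E < {N, A} < U < M
def pvJoin (s t : PvSt) : PvSt :=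
  if s = .E then t
  else if t = s then s
  else if s = .M ∨ t = .M then .M
  else .U

def classify_format_py_alt (ref_id : String) : String :=
  let clean_id := PySem.Str.replace ref_id " " ""
  let cats := clean_id.toList.map pvCategory
  let state := cats.foldl pvJoin .E
  if state = .N then "numeric_" ++ PySem.Int.toStr (PySem.Str.len clean_id)
  else if state = .A then "alpha_" ++ PySem.Int.toStr (PySem.Str.len clean_id)
  else if state = .U then
    "alnum_L" ++ PySem.Int.toStr (PySem.List.count cats PvSt.A : Int)
      ++ "_D" ++ PySem.Int.toStr (PySem.List.count cats PvSt.N : Int)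
  else "mixed_special"

-- ===== PRECONDITION & SPEC =====
def Spec_classify_format_py (ref_id : String) (out : String) : Prop := out = classify_format_py_alt ref_id
instance (ref_id : String) (out : String) : Decidable (Spec_classify_format_py ref_id out) := by unfold Spec_classify_format_py; infer_instance

-- ===== CLAIM (what is proved, stated in full; the proofs are below) =====
def Claim_equal_classify_format_py : Prop := ∀ (ref_id : String), Dom_classify_format_py ref_id → Spec_classify_format_py ref_id (classify_format_py ref_id)

-- ===== LEMMAS AND PROOFS =====

-- the intended value of the fold on a NONEMPTY list of characters
def pvK (cs : List Char) : PvSt :=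
  if cs.all PySem.Chars.isdigit then .N
  else if cs.all PySem.Chars.isalpha then .A
  else if cs.all PySem.Chars.isalnum then .U
  else .M

theorem pv_digit_alpha (c : Char) :
    PySem.Chars.isdigit c = true → PySem.Chars.isalpha c = false := by
  simp only [PySem.Chars.isdigit, PySem.Chars.isalpha, PySem.Chars.isupper, PySem.Chars.islower,
    Bool.and_eq_true, Bool.or_eq_false_iff, Bool.and_eq_false_iff, decide_eq_true_eq,
    decide_eq_false_iff_not, Char.le_def, UInt32.le_iff_toNat_le]
  intro h
  constructor <;> [left; left] <;> intro hc <;> simp_all <;> omega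

-- abstract boolean core of pvK_cons
theorem pv_bool (hd ha d2 a2 u2 : Bool)
    (H1 : hd = true → ha = false)
    (H2 : d2 = true → a2 = false)
    (H3 : d2 = true → u2 = true)
    (H4 : a2 = true → u2 = true) :
    (if (hd && d2) = true then PvSt.N else if (ha && a2) = true then .A
      else if ((ha || hd) && u2) = true then .U else .M)
    = pvJoin (if hd = true then .N else if ha = true then .A else if (ha || hd) = true then .U else .M)
             (if d2 = true then .N else if a2 = true then .A else if u2 = true then .U else .M) := by
  revert H1 H2 H3 H4
  cases hd <;> cases ha <;> cases d2 <;> cases a2 <;> cases u2 <;> decide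

theorem pv_assoc (s t u : PvSt) (ht : t ≠ .E) :
    pvJoin (pvJoin s t) u = pvJoin s (pvJoin t u) := by
  cases s <;> cases t <;> cases u <;> first | (exact absurd rfl ht) | decide

theorem pv_category_ne_E (c : Char) : pvCategory c ≠ .E := by
  unfold pvCategory; split_ifs <;> simp

theorem pvK_singleton (c : Char) : pvK [c] = pvCategory c := by
  unfold pvK pvCategory
  have halnum : PySem.Chars.isalnum c = (PySem.Chars.isalpha c || PySem.Chars.isdigit c) := rfl
  simp only [List.all_cons, List.all_nil, Bool.and_true, halnum]

theorem pvK_cons (c : Char) (cs : List Char) (h : cs ≠ []) :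
    pvK (c :: cs) = pvJoin (pvCategory c) (pvK cs) := by
  have halnum : ∀ x : Char,
      PySem.Chars.isalnum x = (PySem.Chars.isalpha x || PySem.Chars.isdigit x) := fun _ => rfl
  have H2 : cs.all PySem.Chars.isdigit = true → cs.all PySem.Chars.isalpha = false := by
    intro h1
    rcases cs with _ | ⟨x, xs⟩
    · exact absurd rfl h
    · simp only [List.all_cons, Bool.and_eq_true] at h1
      simp only [List.all_cons, Bool.and_eq_false_iff]
      exact Or.inl (pv_digit_alpha x h1.1)
  have H3 : cs.all PySem.Chars.isdigit = true →
      cs.all (fun x => PySem.Chars.isalpha x || PySem.Chars.isdigit x) = true := by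
    intro h1
    rw [List.all_eq_true] at *
    intro x hx; simp [h1 x hx]
  have H4 : cs.all PySem.Chars.isalpha = true →
      cs.all (fun x => PySem.Chars.isalpha x || PySem.Chars.isdigit x) = true := by
    intro h1
    rw [List.all_eq_true] at *
    intro x hx; simp [h1 x hx]
  unfold pvK pvCategory
  simp only [List.all_cons, halnum]
  exact pv_bool _ _ _ _ _ (pv_digit_alpha c) H2 H3 H4

theorem pv_fold_eq (cs : List Char) : ∀ s : PvSt,
    cs.foldl (fun s c => pvJoin s (pvCategory c)) s =
      (if cs.isEmpty then s else pvJoin s (pvK cs)) := by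
  induction cs with
  | nil => intro s; simp
  | cons c cs ih =>
    intro s
    simp only [List.foldl_cons, ih, List.isEmpty_cons, Bool.false_eq_true, if_false]
    rcases hcs : cs with _ | ⟨d, ds⟩
    · simp only [List.isEmpty_nil, if_true, pvK_singleton]
    · simp only [List.isEmpty_cons, Bool.false_eq_true, if_false]
      rw [pvK_cons c (d :: ds) (by simp)]
      exact pv_assoc s (pvCategory c) (pvK (d :: ds)) (pv_category_ne_E c)

theorem pvJoin_E (t : PvSt) : pvJoin .E t = t := rfl

theorem pv_count_N (cs : List Char) :
    ((PySem.List.count (cs.map pvCategory) PvSt.N : Nat) : Int) =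
      (cs.map (fun c => if PySem.Chars.isdigit c then (1 : Int) else 0)).sum := by
  induction cs with
  | nil => simp [PySem.List.count]
  | cons c cs ih =>
    simp only [List.map_cons, PySem.List.count, List.count_cons] at *
    rcases hd : PySem.Chars.isdigit c with _ | _
    · simp [pvCategory, hd]; split_ifs <;> simp_all
    · simp [pvCategory, hd, ih]; omega

theorem pv_count_A (cs : List Char) :
    ((PySem.List.count (cs.map pvCategory) PvSt.A : Nat) : Int) =
      (cs.map (fun c => if PySem.Chars.isalpha c then (1 : Int) else 0)).sum := by
  induction cs with
  | nil => simp [PySem.List.count]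
  | cons c cs ih =>
    simp only [List.map_cons, PySem.List.count, List.count_cons] at *
    rcases hd : PySem.Chars.isdigit c with _ | _ <;> rcases ha : PySem.Chars.isalpha c with _ | _
    · simp [pvCategory, hd, ha]; split_ifs <;> simp_all
    · simp [pvCategory, hd, ha, ih]; omega
    · simp [pvCategory, hd]; exact ih
    · exact absurd ha (by simp [pv_digit_alpha c hd])

-- ===== VERDICT (by name: the statement is the Claim_ definition above) =====
theorem classify_format_py_spec : Claim_equal_classify_format_py := by
  intro ref_id _
  show classify_format_py ref_id = classify_format_py_alt ref_id
  unfold classify_format_py classify_format_py_alt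
  simp only [PySem.Str.strIsdigit_eq, PySem.Str.strIsalpha_eq, PySem.Str.strIsalnum_eq,
    PySem.Chars.strIsdigit, PySem.Chars.strIsalpha, PySem.Chars.strIsalnum,
    List.foldl_map, pv_fold_eq, pvJoin_E, pv_count_N, pv_count_A]
  rcases hc : (PySem.Str.replace ref_id " " "").toList with _ | ⟨c, cs⟩
  · simp
  · simp only [List.isEmpty_cons, Bool.false_eq_true, if_false, Bool.not_false, Bool.true_and,
]
    unfold pvK
    split_ifs <;> simp_all
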